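-- pv_equiv track=rewrite | github.com/Copenhagen-Alliance/versification-specification | versification-sniffing/python/usx2versification.py | map_to
-- ===== SOURCE A (Python) =====
-- def map_to(rule:dict) -> int:
--         """
--         Which column should we map to?
--
--         "Hebrew" - if there is a Hebrew source, always map to that.
--         "Greek" - if there is a straightforward Greek source, but not a Hebrew one,
--                   use the Greek source
--         None - couldn't find a Hebrew or Greek source. Nothing to map onto.
--         """
--         to = None
--         name = rule["name"]
--         columns = rule["columns"]
--         for c in range(0, len(columns)):
--                 if "Hebrew" in columns[c]:
--                         return c
--                 elif "Greek" in columns[c]: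
--                         to = c
--                         continue
--
--         return to
-- ===== SOURCE B (Python) =====
-- def map_to(rule: dict) -> int:
--     """
--     Which column should we map to?
--
--     First pass: first column containing "Hebrew"; otherwise a reverse
--     pass finds the last column containing "Greek"; otherwise None.
--     (rule["name"] is read, as in the original, so a missing "name" key
--     still raises KeyError.)
--     """
--     name = rule["name"]
--     columns = rule["columns"]
--     for c in range(len(columns)):
--         if "Hebrew" in columns[c]:
--             return c
--     for c in range(len(columns) - 1, -1, -1):
--         if "Greek" in columns[c]:
--             return c
--     return None
-- ===== Notes on version B (the rewrite author's own statement) =====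
-- stated objective: simpler
-- what changed: Replaces the single loop that threads a 'to' accumulator (last Greek seen, overridden by early return on Hebrew) with two accumulator-free scans: a forward scan returning the first Hebrew column, then a reverse scan returning the last Greek column.
-- outside the precondition, e.g. on map_to({}): A raises KeyError, B raises KeyError
import Mathlib
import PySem

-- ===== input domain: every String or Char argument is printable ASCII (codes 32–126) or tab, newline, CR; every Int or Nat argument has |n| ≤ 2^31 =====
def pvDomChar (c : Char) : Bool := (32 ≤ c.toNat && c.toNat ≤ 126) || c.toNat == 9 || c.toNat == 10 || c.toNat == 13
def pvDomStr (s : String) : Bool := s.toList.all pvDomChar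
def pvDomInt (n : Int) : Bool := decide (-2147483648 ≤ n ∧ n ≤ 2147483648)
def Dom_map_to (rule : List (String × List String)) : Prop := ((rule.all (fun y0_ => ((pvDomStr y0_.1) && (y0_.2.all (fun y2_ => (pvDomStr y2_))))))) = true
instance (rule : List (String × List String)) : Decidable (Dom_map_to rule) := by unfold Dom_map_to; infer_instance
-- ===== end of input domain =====

-- B: same lookup, but two accumulator-free scans (first "Hebrew" forward, else last "Greek" backward) instead of one loop threading a last-Greek accumulator; simpler decomposition, same cost.

-- ===== PORT A =====
-- A's single loop: early return on the first "Hebrew" column, otherwise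
-- remember the latest "Greek" column in the accumulator `to`.
def mapToLoopA (cols : List String) (i : Int) (to_ : Option Int) : Option Int :=
  match cols with
  | [] => to_
  | c :: rest =>
    if PySem.Str.isIn "Hebrew" c then some i
    else if PySem.Str.isIn "Greek" c then mapToLoopA rest (i + 1) (some i)
    else mapToLoopA rest (i + 1) to_

def map_to (rule : List (String × List String)) : Option Int :=
  match (PySem.Dict.mk rule).get? "name", (PySem.Dict.mk rule).get? "columns" with
  | some _, some columns => mapToLoopA columns 0 none
  | _, _ => none  -- KeyError in Python; excluded by Pre_map_to

-- ===== PORT B =====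
-- forward scan: first column containing "Hebrew"
def hebFwd (cols : List String) (i : Int) : Option Int :=
  match cols with
  | [] => none
  | c :: rest => if PySem.Str.isIn "Hebrew" c then some i else hebFwd rest (i + 1)

-- reverse scan (over the reversed list, index counting down): last column containing "Greek"
def greekRev (rcols : List String) (i : Int) : Option Int :=
  match rcols with
  | [] => none
  | c :: rest => if PySem.Str.isIn "Greek" c then some i else greekRev rest (i - 1)

def map_to_alt (rule : List (String × List String)) : Option Int :=
  match (PySem.Dict.mk rule).get? "name" with
  | none => none  -- KeyError in Python; excluded by Pre_map_to
  | some _ =>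
    match (PySem.Dict.mk rule).get? "columns" with
    | none => none  -- KeyError in Python; excluded by Pre_map_to
    | some columns =>
      match hebFwd columns 0 with
      | some i => some i
      | none => greekRev columns.reverse ((columns.length : Int) - 1)

-- ===== PRECONDITION & SPEC =====
-- Pre_ excludes exactly the inputs where Python's rule["name"] / rule["columns"] raises KeyError.
def Pre_map_to (rule : List (String × List String)) : Prop :=
  (PySem.Dict.mk rule).contains "name" = true ∧ (PySem.Dict.mk rule).contains "columns" = true
instance (rule : List (String × List String)) : Decidable (Pre_map_to rule) := by
  unfold Pre_map_to; infer_instance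

def pvWitness_map_to : (List (String × List String)) :=
  [("name", ["rule1"]), ("columns", ["Hebrew Bible", "Greek NT", "other"])]

def Spec_map_to (rule : List (String × List String)) (out : Option Int) : Prop := out = map_to_alt rule
instance (rule : List (String × List String)) (out : Option Int) : Decidable (Spec_map_to rule out) := by unfold Spec_map_to; infer_instance

-- ===== CLAIM (what is proved, stated in full; the proofs are below) =====
def Claim_equal_map_to : Prop := ∀ (rule : List (String × List String)), Dom_map_to rule → Pre_map_to rule → Spec_map_to rule (map_to rule)

-- ===== LEMMAS AND PROOFS =====

theorem greekRev_append (xs ys : List String) (i : Int) :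
    greekRev (xs ++ ys) i = (greekRev xs i).or (greekRev ys (i - xs.length)) := by
  induction xs generalizing i with
  | nil => simp [greekRev]
  | cons c rest ih =>
    simp only [List.cons_append, greekRev]
    split
    · simp
    · rw [ih]
      congr 2
      simp only [List.length_cons]
      omega

theorem mapToLoopA_eq (cols : List String) (i : Int) (to_ : Option Int) :
    mapToLoopA cols i to_ =
      ((hebFwd cols i).or (greekRev cols.reverse (i + (cols.length : Int) - 1))).or to_ := by
  induction cols generalizing i to_ with
  | nil => simp [mapToLoopA, hebFwd, greekRev]
  | cons c rest ih =>
    simp only [mapToLoopA, hebFwd, List.reverse_cons, List.length_cons]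
    by_cases hH : PySem.Str.isIn "Hebrew" c = true
    · simp only [if_pos hH, Option.some_or]
    · rw [if_neg hH, if_neg hH, greekRev_append]
      have e3 : i + ((rest.length + 1 : Nat) : Int) - 1 = i + 1 + (rest.length : Int) - 1 := by
        omega
      have e4 : i + 1 + (rest.length : Int) - 1 - (rest.reverse.length : Int) = i := by
        simp only [List.length_reverse]; omega
      by_cases hG : PySem.Str.isIn "Greek" c = true
      · rw [if_pos hG, ih]
        simp only [greekRev, if_pos hG, e3, e4, Option.or_assoc, Option.some_or]
      · rw [if_neg hG, ih]
        simp only [greekRev, if_neg hG, e3, Option.or_none]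

-- ===== VERDICT (by name: the statement is the Claim_ definition above) =====
theorem map_to_spec : Claim_equal_map_to := by
  intro rule _ _
  unfold Spec_map_to map_to map_to_alt
  cases hn : (PySem.Dict.mk rule).get? "name" <;>
    cases hc : (PySem.Dict.mk rule).get? "columns" <;> simp
  rename_i columns
  rw [mapToLoopA_eq]
  cases h : hebFwd columns 0 <;>
    simp only [Option.or_none, Option.none_or, Option.some_or, zero_add]
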